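-- pv_equiv track=rewrite | github.com/pypi-data/pypi-mirror-61 | packages/agcli/agcli-1.5.0-py3-none-any.whl/agcli/docparser/explainshell_parser.py | _get_subblock
-- ===== SOURCE A (Python) =====
-- def _get_subblock(option_block):
--     """
--     Split an option block in different subblocks to handle options written
--     in several blocks.
--     """
--     subblocks = option_block.split('\n')
--     option_subblocks = []
--     for subblock in subblocks:
--         #subblock = subblock.strip()
--         if subblock.startswith('-') or len(subblock.split(' ')[0]) == 1:
--             #First word of the block means an option
--             option_subblocks.append(subblock)
--         elif not len(option_subblocks)==0 :
--             #Skip subtitle and stick rebuild the help block of the option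
--             option_subblocks[-1] += '  ' + subblock.strip()
--     return option_subblocks
-- ===== SOURCE B (Python) =====
-- def _get_subblock(option_block):
--     """
--     Split an option block in different subblocks to handle options written
--     in several blocks.
--     """
--     lines = option_block.split('\n')
--     headers = [i for i, line in enumerate(lines)
--                if line.startswith('-') or len(line.split(' ')[0]) == 1]
--     ends = headers[1:] + [len(lines)]
--     return [lines[h] + ''.join('  ' + line.strip() for line in lines[h + 1:e])
--             for h, e in zip(headers, ends)]
-- ===== Notes on version B (the rewrite author's own statement) =====
-- stated objective: alternative
-- what changed: Replaces A's single accumulating fold that rewrites the last element of the output list with two staged passes: pass one collects the indices of header lines via enumerate/filter, pass two assembles each subblock independently by slicing lines[h+1:e] between consecutive header indices and joining the stripped continuations.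
import Mathlib
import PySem

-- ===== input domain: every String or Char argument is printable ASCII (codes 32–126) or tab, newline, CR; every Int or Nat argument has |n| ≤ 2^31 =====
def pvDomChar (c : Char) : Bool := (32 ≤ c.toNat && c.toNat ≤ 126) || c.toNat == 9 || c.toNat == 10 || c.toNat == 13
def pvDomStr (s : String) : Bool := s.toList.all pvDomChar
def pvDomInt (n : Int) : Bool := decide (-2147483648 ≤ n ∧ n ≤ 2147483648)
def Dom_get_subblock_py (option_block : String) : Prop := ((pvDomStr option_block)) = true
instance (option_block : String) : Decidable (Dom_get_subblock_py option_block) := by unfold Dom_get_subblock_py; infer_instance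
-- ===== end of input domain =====

-- B replaces A's single mutating fold by two staged passes — first collect the header
-- line indices, then assemble each subblock from an index range by slicing and joining
-- (objective: alternative decomposition, same cost).

-- ===== PORT A =====
-- shared predicate: line.startswith('-') or len(line.split(' ')[0]) == 1
-- (Python split(' ') always returns a nonempty list, so indexing [0] is exactly headD "")
def pvIsHeader (line : String) : Bool :=
  PySem.Str.startswith line "-" ||
    PySem.Str.len (((PySem.Str.split? line " ").getD []).headD "") == 1

def get_subblock_py (option_block : String) : List String :=
  let subblocks := (PySem.Str.split? option_block "\n").getD []
  subblocks.foldl (fun acc subblock =>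
    if pvIsHeader subblock then acc ++ [subblock]
    else if acc.length == 0 then acc
    -- option_subblocks[-1] += '  ' + subblock.strip()  (acc nonempty here)
    else acc.dropLast ++ [acc.getLastD "" ++ "  " ++ PySem.Str.strip subblock]) []

-- ===== PORT B =====
-- pass 1: header indices; pass 2: one subblock per index range lines[h:e]
def get_subblock_py_alt (option_block : String) : List String :=
  let lines := (PySem.Str.split? option_block "\n").getD []
  let headers := ((PySem.List.enumerate lines).filter (fun p => pvIsHeader p.2)).map (·.1)
  let ends := headers.drop 1 ++ [(lines.length : Int)]
  (headers.zip ends).map (fun p =>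
    PySem.List.pyGetD lines p.1 "" ++
      PySem.Str.join "" ((PySem.List.slice lines (some (p.1 + 1)) (some p.2)).map
        (fun line => "  " ++ PySem.Str.strip line)))

-- ===== PRECONDITION & SPEC =====
def Spec_get_subblock_py (option_block : String) (out : List String) : Prop := out = get_subblock_py_alt option_block
instance (option_block : String) (out : List String) : Decidable (Spec_get_subblock_py option_block out) := by unfold Spec_get_subblock_py; infer_instance

-- ===== CLAIM (what is proved, stated in full; the proofs are below) =====
def Claim_equal_get_subblock_py : Prop := ∀ (option_block : String), Dom_get_subblock_py option_block → Spec_get_subblock_py option_block (get_subblock_py option_block)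

-- ===== LEMMAS AND PROOFS =====

-- A's loop step
def pvStep (acc : List String) (subblock : String) : List String :=
  if pvIsHeader subblock then acc ++ [subblock]
  else if acc.length == 0 then acc
  else acc.dropLast ++ [acc.getLastD "" ++ "  " ++ PySem.Str.strip subblock]

-- proof intermediate: segment recursion both sides are reduced to
def pvCollect (block : String) : List String → String × List String
  | [] => (block, [])
  | l :: rest =>
    if pvIsHeader l then (block, l :: rest)
    else pvCollect (block ++ "  " ++ PySem.Str.strip l) rest

theorem pvCollect_snd_length (block : String) (xs : List String) :
    (pvCollect block xs).2.length ≤ xs.length := by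
  induction xs generalizing block with
  | nil => simp [pvCollect]
  | cons l rest ih =>
    simp only [pvCollect]
    split
    · simp
    · exact Nat.le_trans (ih _) (Nat.le_succ _)

def pvGroups : List String → List String
  | [] => []
  | l :: rest =>
    if pvIsHeader l then
      (pvCollect l rest).1 :: pvGroups (pvCollect l rest).2
    else pvGroups rest
termination_by xs => xs.length
decreasing_by
  · exact Nat.lt_succ_of_le (pvCollect_snd_length _ _)
  · simp

-- ===== A-side: the fold equals pvGroups =====

theorem pvFold_concat (xs : List String) (ys : List String) (b : String) :
    xs.foldl pvStep (ys ++ [b]) =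
      ys ++ (pvCollect b xs).1 :: pvGroups (pvCollect b xs).2 := by
  induction xs generalizing ys b with
  | nil => simp [pvCollect, pvGroups]
  | cons x rest ih =>
    by_cases h : pvIsHeader x = true
    · rw [List.foldl_cons, show pvStep (ys ++ [b]) x = (ys ++ [b]) ++ [x] by simp [pvStep, h], ih]
      simp [pvCollect, h, pvGroups]
    · rw [List.foldl_cons,
        show pvStep (ys ++ [b]) x = ys ++ [b ++ "  " ++ PySem.Str.strip x] by
          simp [pvStep, h], ih]
      simp [pvCollect, h]

theorem pvFold_eq_groups (xs : List String) :
    xs.foldl pvStep [] = pvGroups xs := by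
  induction xs with
  | nil => simp [pvGroups]
  | cons x rest ih =>
    by_cases h : pvIsHeader x = true
    · simp only [List.foldl_cons, pvStep, h, if_pos, List.nil_append]
      have := pvFold_concat rest [] x
      simpa [pvGroups, h] using this
    · simp [List.foldl_cons, pvStep, h, pvGroups, ih]

-- ===== B-side: Nat-level form of the staged passes =====

-- header indices, relative form
def pvHN : List String → List Nat
  | [] => []
  | x :: xs => (if pvIsHeader x then [0] else []) ++ (pvHN xs).map (· + 1)

-- one assembled segment lines[h] ++ joined strips of lines[h+1:e]
def pvSeg (xs : List String) (h e : Nat) : String :=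
  xs.getD h "" ++
    PySem.Str.join "" (((xs.drop (h + 1)).take (e - (h + 1))).map
      (fun line => "  " ++ PySem.Str.strip line))

def pvFN (xs : List String) : List String :=
  ((pvHN xs).zip ((pvHN xs).drop 1 ++ [xs.length])).map (fun p => pvSeg xs p.1 p.2)

theorem pvJoin_empty_cons (a : String) (l : List String) :
    PySem.Str.join "" (a :: l) = a ++ PySem.Str.join "" l := by
  show String.ofList (PySem.Chars.join [] (a.toList :: l.map String.toList)) = _
  have h : PySem.Chars.join [] (a.toList :: l.map String.toList) =
      a.toList ++ PySem.Chars.join [] (l.map String.toList) := by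
    cases l <;> simp [PySem.Chars.join, List.intercalate]
  have ht : (PySem.Str.join "" l).toList = PySem.Chars.join [] (l.map String.toList) := by
    simp [PySem.Str.join]
  rw [h, ← ht]
  exact (String.congr_append a (PySem.Str.join "" l)).symm

-- the enumerate/filter pass computes pvHN shifted by the start index
theorem pvEnum_filter (xs : List String) (s : Int) :
    (((PySem.List.enumerate xs s).filter (fun p => pvIsHeader p.2)).map (·.1)) =
      (pvHN xs).map (fun (n : Nat) => s + (n : Int)) := by
  induction xs generalizing s with
  | nil => simp [PySem.List.enumerate, pvHN]
  | cons x xs ih =>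
    rw [PySem.List.enumerate_cons]
    have step : (pvHN xs).map (fun (n : Nat) => s + 1 + (n : Int)) =
        ((pvHN xs).map (· + 1)).map (fun (n : Nat) => s + (n : Int)) := by
      rw [List.map_map]
      exact List.map_congr_left fun n _ => by simp [Function.comp]; ring
    by_cases h : pvIsHeader x = true
    · rw [List.filter_cons_of_pos (by simpa using h), List.map_cons, ih, pvHN, step]
      simp [h]
    · rw [List.filter_cons_of_neg (by simpa using h), ih, pvHN, step]
      simp [h]

theorem pvSeg_cons (x : String) (xs : List String) (h e : Nat) :
    pvSeg (x :: xs) (h + 1) (e + 1) = pvSeg xs h e := by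
  simp [pvSeg, Nat.succ_sub_succ]

-- shifting both index lists by one moves the segments across a cons
theorem pvShift (A B : List Nat) (x : String) (xs : List String) :
    ((A.map (· + 1)).zip (B.map (· + 1))).map (fun p => pvSeg (x :: xs) p.1 p.2) =
      (A.zip B).map (fun p => pvSeg xs p.1 p.2) := by
  rw [List.zip_map, List.map_map]
  exact List.map_congr_left fun p _ => pvSeg_cons x xs p.1 p.2

theorem pvFN_cons_not (x : String) (xs : List String) (hx : ¬ pvIsHeader x = true) :
    pvFN (x :: xs) = pvFN xs := by
  unfold pvFN
  simp only [pvHN, hx, Bool.false_eq_true, if_false, List.nil_append,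
    List.length_cons]
  have h1 : ((pvHN xs).map (· + 1)).drop 1 ++ [xs.length + 1] =
      ((pvHN xs).drop 1 ++ [xs.length]).map (· + 1) := by
    simp
  rw [h1, pvShift]

-- first-header characterisation of pvCollect / pvGroups
theorem pvFirst (xs : List String) : ∀ (b : String),
    (pvHN xs = [] → pvCollect b xs =
      (b ++ PySem.Str.join "" (xs.map (fun line => "  " ++ PySem.Str.strip line)), [])) ∧
    (∀ h0 t, pvHN xs = h0 :: t →
      pvCollect b xs =
        (b ++ PySem.Str.join "" ((xs.take h0).map (fun line => "  " ++ PySem.Str.strip line)),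
          xs.drop h0) ∧
      pvGroups xs = pvGroups (xs.drop h0)) := by
  induction xs with
  | nil =>
    intro b
    refine ⟨fun _ => ?_, fun h0 t h => by simp [pvHN] at h⟩
    simp [pvCollect, PySem.Str.join, PySem.Chars.join, List.intercalate]
  | cons x xs ih =>
    intro b
    by_cases hx : pvIsHeader x = true
    · refine ⟨fun h => by simp [pvHN, hx] at h, fun h0 t h => ?_⟩
      have h0eq : h0 = 0 := by simp [pvHN, hx] at h; omega
      subst h0eq
      refine ⟨?_, rfl⟩
      simp [pvCollect, hx, PySem.Str.join, PySem.Chars.join, List.intercalate]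
    · constructor
      · intro h
        have hxs : pvHN xs = [] := by
          simp [pvHN, hx, List.map_eq_nil_iff] at h
          exact h
        have := (ih (b ++ "  " ++ PySem.Str.strip x)).1 hxs
        simp only [pvCollect, hx, Bool.false_eq_true, if_false, this,
          List.map_cons, pvJoin_empty_cons]
        rw [Prod.ext_iff]
        exact ⟨by simp [String.append_assoc], rfl⟩
      · intro h0 t h
        have hxs : ∃ h0' t', pvHN xs = h0' :: t' ∧ h0 = h0' + 1 := by
          simp only [pvHN, hx, Bool.false_eq_true, if_false, List.nil_append] at h
          cases hh : pvHN xs with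
          | nil => rw [hh] at h; simp at h
          | cons a l => rw [hh] at h; simp at h; exact ⟨a, l, rfl, h.1.symm⟩
        obtain ⟨h0', t', hh, he⟩ := hxs
        subst he
        have := ((ih (b ++ "  " ++ PySem.Str.strip x)).2 h0' t' hh).1
        have hgr := ((ih b).2 h0' t' hh).2
        constructor
        · simp only [pvCollect, hx, Bool.false_eq_true, if_false, this,
            List.take_succ_cons, List.drop_succ_cons, List.map_cons, pvJoin_empty_cons]
          rw [Prod.ext_iff]
          exact ⟨by simp [String.append_assoc], rfl⟩
        · rw [show pvGroups (x :: xs) = pvGroups xs by simp [pvGroups, hx],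
            List.drop_succ_cons]
          exact hgr

theorem pvGroups_of_no_header (xs : List String) (h : pvHN xs = []) :
    pvGroups xs = [] := by
  induction xs with
  | nil => simp [pvGroups]
  | cons x xs ih =>
    by_cases hx : pvIsHeader x = true
    · simp [pvHN, hx] at h
    · have : pvHN xs = [] := by
        simp [pvHN, hx, List.map_eq_nil_iff] at h
        exact h
      simp [pvGroups, hx, ih this]

theorem pvFN_cons_head (x : String) (xs : List String) (hx : pvIsHeader x = true) :
    pvFN (x :: xs) =
      pvSeg (x :: xs) 0 ((pvHN xs).headD xs.length + 1) :: pvFN xs := by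
  unfold pvFN
  rw [show pvHN (x :: xs) = 0 :: (pvHN xs).map (· + 1) by simp [pvHN, hx]]
  cases hh : pvHN xs with
  | nil => simp
  | cons h0 t =>
    simp only [List.map_cons, List.drop_succ_cons, List.drop_zero,
      List.length_cons, List.cons_append, List.zip_cons_cons, List.map_cons,
      List.headD_cons]
    refine congrArg₂ _ rfl ?_
    have h1 : (t.map (· + 1)) ++ [xs.length + 1] = (t ++ [xs.length]).map (· + 1) := by
      simp
    rw [h1, show ((h0 + 1) :: t.map (· + 1)) = ((h0 :: t).map (· + 1)) by simp,
      pvShift (h0 :: t) (t ++ [xs.length]) x xs]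

theorem pvFN_eq_groups (xs : List String) : pvFN xs = pvGroups xs := by
  induction xs with
  | nil => simp [pvFN, pvHN, pvGroups]
  | cons x xs ih =>
    by_cases hx : pvIsHeader x = true
    · rw [pvFN_cons_head x xs hx, ih,
        show pvGroups (x :: xs) = (pvCollect x xs).1 :: pvGroups (pvCollect x xs).2 by
          simp [pvGroups, hx]]
      cases hh : pvHN xs with
      | nil =>
        have hc := (pvFirst xs x).1 hh
        rw [hc]
        refine congrArg₂ _ ?_ ?_
        · simp [pvSeg, List.take_length]
        · exact (pvGroups_of_no_header xs hh).trans (by simp [pvGroups])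
      | cons h0 t =>
        have hc := ((pvFirst xs x).2 h0 t hh).1
        have hg := ((pvFirst xs x).2 h0 t hh).2
        rw [hc]
        refine congrArg₂ _ ?_ ?_
        · simp [pvSeg]
        · exact hg
    · rw [pvFN_cons_not x xs hx, ih, show pvGroups (x :: xs) = pvGroups xs by simp [pvGroups, hx]]

-- the Int-level port B equals the Nat-level staged passes
theorem pvAlt_eq_FN (option_block : String) :
    get_subblock_py_alt option_block = pvFN ((PySem.Str.split? option_block "\n").getD []) := by
  unfold get_subblock_py_alt pvFN
  dsimp only
  set lines := (PySem.Str.split? option_block "\n").getD [] with hl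
  rw [pvEnum_filter lines 0]
  have hcast : (pvHN lines).map (fun (n : Nat) => (0 : Int) + (n : Int)) =
      (pvHN lines).map (fun (n : Nat) => (n : Int)) := by
    exact List.map_congr_left fun n _ => by ring
  rw [hcast]
  have hends : ((pvHN lines).map (fun (n : Nat) => (n : Int))).drop 1 ++ [(lines.length : Int)] =
      ((pvHN lines).drop 1 ++ [lines.length]).map (fun (n : Nat) => (n : Int)) := by
    simp
  rw [hends, List.zip_map, List.map_map]
  refine List.map_congr_left fun p _ => ?_
  show PySem.List.pyGetD lines (p.1 : Int) "" ++
      PySem.Str.join "" ((PySem.List.slice lines (some ((p.1 : Int) + 1)) (some (p.2 : Int))).map _) = _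
  rw [PySem.List.pyGetD_natCast, show ((p.1 : Int) + 1) = ((p.1 + 1 : Nat) : Int) by push_cast; ring,
    PySem.List.slice_natCast]
  rfl

-- ===== VERDICT (by name: the statement is the Claim_ definition above) =====
theorem get_subblock_py_spec : Claim_equal_get_subblock_py := by
  intro option_block _
  unfold Spec_get_subblock_py get_subblock_py
  rw [pvAlt_eq_FN, pvFN_eq_groups]
  exact pvFold_eq_groups _
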